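-- pv_equiv track=rewrite | github.com/mag1c1an1/coding | py/coding_test/pdd/pdd _1.py | count_lucky_in_range
-- ===== SOURCE A (Python) =====
-- is_lucky_cache = {}
--
-- def is_lucky_number(num):
--     """判断一个数是否是幸运数字（包含连续子串且该子串是3的倍数）"""
--     # 检查缓存
--     if num in is_lucky_cache:
--         return is_lucky_cache[num]
--
--     # 特殊情况：如果数字本身是3的倍数，直接返回True
--     if num % 3 == 0:
--         is_lucky_cache[num] = True
--         return True
--
--     num_str = str(num)
--     n = len(num_str)
--
--     # 遍历所有可能的子串，使用O(n²)检查
--     for i in range(n):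
--         # 初始化当前子串的值
--         val = 0
--         for j in range(i, n):
--             # 累加数字到子串
--             val = val * 10 + int(num_str[j])
--             # 检查子串是否是3的倍数，不考虑前导0的子串
--             if val % 3 == 0 and (i == 0 or num_str[i] != '0'):
--                 is_lucky_cache[num] = True
--                 return True
--
--     is_lucky_cache[num] = False
--     return False
--
-- count_cache = {}
--
-- def count_lucky_in_range(start, end):
--     """计算范围内的幸运数字个数"""
--     # 检查缓存
--     key = (start, end)
--     if key in count_cache:
--         return count_cache[key]
--
--     count = 0
--     for num in range(start, end + 1):
--         if is_lucky_number(num):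
--             count += 1
--
--     # 存入缓存
--     count_cache[key] = count
--     return count
-- ===== SOURCE B (Python) =====
-- def _is_lucky(num):
--     # one pass over the digits: a substring divisible by 3 exists iff two prefix
--     # digit-sum residues (at an allowed start position and after some position) coincide
--     if num % 3 == 0:
--         return True
--     s = str(abs(num))
--     seen = [False, False, False]
--     pref = 0
--     for idx, ch in enumerate(s):
--         if idx == 0 or ch != '0':
--             seen[pref] = True
--         pref = (pref + int(ch)) % 3
--         if seen[pref]:
--             return True
--     return False
--
-- def count_lucky_in_range(start, end):
--     count = 0
--     for num in range(start, end + 1):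
--         if _is_lucky(num):
--             count += 1
--     return count
-- ===== Notes on version B (the rewrite author's own statement) =====
-- stated objective: faster
-- what changed: Per number, the O(d^2) enumeration of all substrings is replaced by a single left-to-right pass that tracks the digit-sum residue mod 3 and the set of residues seen at allowed start positions, detecting a divisible-by-3 substring in O(d); the memo dictionaries are dropped.
import Mathlib
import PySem

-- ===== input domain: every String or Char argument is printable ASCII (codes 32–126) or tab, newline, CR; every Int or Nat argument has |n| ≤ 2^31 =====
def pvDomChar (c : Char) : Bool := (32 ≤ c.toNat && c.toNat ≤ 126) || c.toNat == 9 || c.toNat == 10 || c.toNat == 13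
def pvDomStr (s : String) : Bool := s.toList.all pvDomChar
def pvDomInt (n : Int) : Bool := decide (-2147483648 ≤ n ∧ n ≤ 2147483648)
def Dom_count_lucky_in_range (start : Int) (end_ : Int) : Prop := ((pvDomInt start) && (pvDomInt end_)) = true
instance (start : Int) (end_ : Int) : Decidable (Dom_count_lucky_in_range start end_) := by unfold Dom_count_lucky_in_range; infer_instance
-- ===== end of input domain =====

-- B replaces A's per-number nested substring enumeration by a single pass over the digits
-- tracking prefix-digit-sum residues mod 3 (objective: faster); A's pure memo dictionaries
-- are dropped (they never change the returned value).

-- ===== PORT A =====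

-- int(num_str[j]) for a single digit character; exact on '0'..'9' (the only chars reached)
def pvDigit (c : Char) : Int := (c.toNat : Int) - 48

-- inner loop of is_lucky_number: 'for j in range(i, n): val = val*10+int(num_str[j]);
-- if val % 3 == 0 and ok: return True' over the suffix num_str[i:], with ok the
-- (per-i constant) test '(i == 0 or num_str[i] != '0')'
def pvScanA : List Char → Int → Bool → Bool
  | [], _, _ => false
  | c :: t, val, ok =>
    let v := val * 10 + pvDigit c
    if PySem.Int.mod v 3 == 0 && ok then true else pvScanA t v ok

-- is_lucky_number (the module caches are pure memoisation and do not affect the value);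
-- 'for i in range(n): … return True' is a search over i; s.getD i ' ' = num_str[i], exact since i < n
def pvIsLuckyA (num : Int) : Bool :=
  if PySem.Int.mod num 3 == 0 then true
  else
    let s := PySem.Int.toChars num
    (List.range s.length).any (fun i => pvScanA (s.drop i) 0 (i == 0 || s.getD i ' ' != '0'))

def count_lucky_in_range (start : Int) (end_ : Int) : Int :=
  (PySem.List.pyRange start (end_ + 1) 1).foldl
    (fun count num => if pvIsLuckyA num then count + 1 else count) 0

-- ===== PORT B =====

-- the single pass of _is_lucky: idx, pref and the 3-element 'seen' list exactly as in Source B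
def pvScanB : List Char → Nat → Int → List Bool → Bool
  | [], _, _, _ => false
  | c :: t, idx, pref, seen =>
    let seen' := if idx == 0 || c != '0' then seen.set pref.toNat true else seen
    let pref' := PySem.Int.mod (pref + pvDigit c) 3
    if seen'.getD pref'.toNat false then true else pvScanB t (idx + 1) pref' seen'

def pvIsLuckyB (num : Int) : Bool :=
  if PySem.Int.mod num 3 == 0 then true
  else pvScanB (PySem.Int.toChars |num|) 0 0 [false, false, false]

def count_lucky_in_range_alt (start : Int) (end_ : Int) : Int :=
  (PySem.List.pyRange start (end_ + 1) 1).foldl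
    (fun count num => if pvIsLuckyB num then count + 1 else count) 0

-- ===== PRECONDITION & SPEC =====
-- Pre_ holds exactly where A returns: A raises ValueError (int('-')) as soon as the range
-- contains a negative number not divisible by 3, i.e. unless the range is empty, starts at
-- a non-negative number, or is the singleton of a negative multiple of 3.
def Pre_count_lucky_in_range (start : Int) (end_ : Int) : Prop :=
  end_ < start ∨ 0 ≤ start ∨ (start = end_ ∧ start % 3 = 0)
instance (start : Int) (end_ : Int) : Decidable (Pre_count_lucky_in_range start end_) := by
  unfold Pre_count_lucky_in_range; infer_instance

def pvWitness_count_lucky_in_range : Int × Int := (10, 30)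

def Spec_count_lucky_in_range (start : Int) (end_ : Int) (out : Int) : Prop := out = count_lucky_in_range_alt start end_
instance (start : Int) (end_ : Int) (out : Int) : Decidable (Spec_count_lucky_in_range start end_ out) := by unfold Spec_count_lucky_in_range; infer_instance

-- ===== CLAIM (what is proved, stated in full; the proofs are below) =====
def Claim_equal_count_lucky_in_range : Prop := ∀ (start : Int) (end_ : Int), Dom_count_lucky_in_range start end_ → Pre_count_lucky_in_range start end_ → Spec_count_lucky_in_range start end_ (count_lucky_in_range start end_)

-- ===== LEMMAS AND PROOFS =====

-- residue mod 3 of the digit sum of the first m characters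
def pvPres (s : List Char) (m : Nat) : Int := ((s.take m).map pvDigit).sum % 3

-- the start positions A's condition '(i == 0 or num_str[i] != '0')' admits
def pvValid (s : List Char) (i : Nat) : Prop := i = 0 ∨ s.getD i ' ' ≠ '0'

-- common characterisation of both searches: some admissible substring has digit sum ≡ 0 (mod 3)
def pvSpec (s : List Char) : Prop :=
  ∃ i j : Nat, i ≤ j ∧ j < s.length ∧ pvValid s i ∧ pvPres s i = pvPres s (j + 1)

theorem pvPres_nonneg (s : List Char) (m : Nat) : 0 ≤ pvPres s m := by unfold pvPres; omega

theorem pvPres_lt (s : List Char) (m : Nat) : pvPres s m < 3 := by unfold pvPres; omega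

theorem valid_iff (s : List Char) (i : Nat) :
    (i == 0 || s.getD i ' ' != '0') = true ↔ pvValid s i := by
  unfold pvValid; simp

theorem scanA_true_iff (t : List Char) (val : Int) (ok : Bool) :
    pvScanA t val ok = true ↔
      ok = true ∧ ∃ k, k < t.length ∧ (val + ((t.take (k + 1)).map pvDigit).sum) % 3 = 0 := by
  induction t generalizing val with
  | nil => simp [pvScanA]
  | cons c t ih =>
    simp only [pvScanA]
    have hmod : PySem.Int.mod (val * 10 + pvDigit c) 3 = (val * 10 + pvDigit c) % 3 :=
      PySem.Int.mod_eq_emod_of_pos (by norm_num)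
    rw [hmod]
    cases hcond : ((val * 10 + pvDigit c) % 3 == 0 && ok) with
    | true =>
      rw [if_pos rfl]
      rw [Bool.and_eq_true, beq_iff_eq] at hcond
      refine ⟨fun _ => ⟨hcond.2, 0, by simp, ?_⟩, fun _ => rfl⟩
      simp only [List.take_succ_cons, List.take_zero, List.map_cons, List.map_nil,
        List.sum_cons, List.sum_nil]
      omega
    | false =>
      simp only [Bool.false_eq_true, if_false, ih]
      constructor
      · rintro ⟨hok, k, hk, hsum⟩
        refine ⟨hok, k + 1, by simp; omega, ?_⟩
        simp only [List.take_succ_cons, List.map_cons, List.sum_cons]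
        omega
      · rintro ⟨hok, k, hk, hsum⟩
        refine ⟨hok, ?_⟩
        cases k with
        | zero =>
          exfalso
          simp only [List.take_succ_cons, List.take_zero, List.map_cons, List.map_nil,
            List.sum_cons, List.sum_nil] at hsum
          rw [Bool.and_eq_false_iff] at hcond
          rcases hcond with h | h
          · rw [beq_eq_false_iff_ne] at h; omega
          · simp [h] at hok
        | succ k' =>
          refine ⟨k', by simp at hk; omega, ?_⟩
          simp only [List.take_succ_cons, List.map_cons, List.sum_cons] at hsum
          omega

theorem seg_mod (s : List Char) (i k : Nat) :
    (((s.drop i).take (k + 1)).map pvDigit).sum % 3 = 0 ↔ pvPres s i = pvPres s (i + (k + 1)) := by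
  unfold pvPres
  rw [List.take_add (i := i) (j := k + 1), List.map_append, List.sum_append]
  omega

theorem searchA_iff (s : List Char) :
    ((List.range s.length).any
      (fun i => pvScanA (s.drop i) 0 (i == 0 || s.getD i ' ' != '0'))) = true ↔ pvSpec s := by
  rw [List.any_eq_true]
  unfold pvSpec
  constructor
  · rintro ⟨i, hi, hscan⟩
    rw [List.mem_range] at hi
    rw [scanA_true_iff] at hscan
    obtain ⟨hok, k, hk, hsum⟩ := hscan
    rw [List.length_drop] at hk
    rw [zero_add] at hsum
    refine ⟨i, i + k, by omega, by omega, (valid_iff s i).mp hok, ?_⟩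
    have h := (seg_mod s i k).mp hsum
    have he : i + (k + 1) = i + k + 1 := by omega
    rwa [he] at h
  · rintro ⟨i, j, hij, hj, hval, hpres⟩
    refine ⟨i, List.mem_range.mpr (by omega), ?_⟩
    rw [scanA_true_iff]
    refine ⟨(valid_iff s i).mpr hval, j - i, by rw [List.length_drop]; omega, ?_⟩
    rw [zero_add]
    rw [seg_mod s i (j - i)]
    have he : i + (j - i + 1) = j + 1 := by omega
    rwa [he]

theorem getD_set_true (seen : List Bool) (p r : Nat) (hlen : seen.length = 3)
    (hp : p < 3) (hr : r < 3) :
    (seen.set p true).getD r false = if r = p then true else seen.getD r false := by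
  obtain ⟨a, b, c, rfl⟩ := List.length_eq_three.mp hlen
  interval_cases p <;> interval_cases r <;> simp

theorem scanB_invariant (s : List Char) (t : List Char) :
    ∀ (m : Nat) (seen : List Bool),
      s.drop m = t →
      seen.length = 3 →
      (∀ r : Nat, r < 3 →
        (seen.getD r false = true ↔ ∃ i, i < m ∧ pvValid s i ∧ (pvPres s i).toNat = r)) →
      (pvScanB t m (pvPres s m) seen = true ↔
        ∃ i j : Nat, i ≤ j ∧ m ≤ j ∧ j < s.length ∧ pvValid s i ∧ pvPres s i = pvPres s (j + 1)) := by
  induction t with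
  | nil =>
    intro m seen hdrop _ _
    have hm : s.length ≤ m := by
      have := congrArg List.length hdrop; simp at this; omega
    simp only [pvScanB]
    constructor
    · intro h; exact absurd h (by simp)
    · rintro ⟨i, j, _, hmj, hj, _, _⟩; omega
  | cons c t ih =>
    intro m seen hdrop hlen hinv
    have hml : m < s.length := by
      have := congrArg List.length hdrop; simp at this; omega
    have hdrop' : s.drop (m + 1) = t := by
      have h1 : s.drop (m + 1) = (s.drop m).drop 1 := by
        rw [List.drop_drop]
      rw [h1, hdrop]; rfl
    have hgetc : s.getD m ' ' = c := by
      have h0 : s[m]? = some c := by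
        have h2 : (List.drop m s)[0]? = s[m + 0]? := List.getElem?_drop
        rw [hdrop] at h2; simpa using h2.symm
      simp [List.getD, h0]
    have htake : s.take (m + 1) = s.take m ++ [c] := by
      rw [List.take_add (i := m) (j := 1), hdrop]
      rfl
    have hpres : PySem.Int.mod (pvPres s m + pvDigit c) 3 = pvPres s (m + 1) := by
      rw [PySem.Int.mod_eq_emod_of_pos (by norm_num)]
      unfold pvPres
      rw [htake, List.map_append, List.sum_append]
      simp only [List.map_cons, List.map_nil, List.sum_cons, List.sum_nil]
      omega
    have hvalidb : (m == 0 || c != '0') = true ↔ pvValid s m := by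
      rw [← hgetc]; exact valid_iff s m
    simp only [pvScanB, hpres]
    set seen' := if m == 0 || c != '0' then seen.set (pvPres s m).toNat true else seen with hseen'
    have hlen' : seen'.length = 3 := by
      rw [hseen']; split <;> simp [hlen]
    have hinv' : ∀ r : Nat, r < 3 →
        (seen'.getD r false = true ↔ ∃ i, i < m + 1 ∧ pvValid s i ∧ (pvPres s i).toNat = r) := by
      intro r hr
      rw [hseen']
      by_cases hv : (m == 0 || c != '0') = true
      · rw [if_pos hv]
        rw [getD_set_true seen _ r hlen (by have := pvPres_lt s m; have := pvPres_nonneg s m; omega) hr]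
        by_cases hrp : r = (pvPres s m).toNat
        · rw [if_pos hrp]
          simp only [true_iff]
          exact ⟨m, by omega, hvalidb.mp hv, hrp.symm⟩
        · rw [if_neg hrp, hinv r hr]
          constructor
          · rintro ⟨i, hi, h1, h2⟩; exact ⟨i, by omega, h1, h2⟩
          · rintro ⟨i, hi, h1, h2⟩
            refine ⟨i, ?_, h1, h2⟩
            rcases Nat.lt_succ_iff_lt_or_eq.mp hi with h | h
            · exact h
            · exfalso; exact hrp (by rw [← h2, h])
      · rw [if_neg hv]
        rw [hinv r hr]
        constructor
        · rintro ⟨i, hi, h1, h2⟩; exact ⟨i, by omega, h1, h2⟩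
        · rintro ⟨i, hi, h1, h2⟩
          refine ⟨i, ?_, h1, h2⟩
          rcases Nat.lt_succ_iff_lt_or_eq.mp hi with h | h
          · exact h
          · exfalso; rw [h] at h1; exact hv (hvalidb.mpr h1)
    have hrec := ih (m + 1) seen' hdrop' hlen' hinv'
    by_cases hchk : seen'.getD (pvPres s (m + 1)).toNat false = true
    · rw [if_pos hchk]
      simp only [true_iff]
      obtain ⟨i, hi, hval, htn⟩ :=
        (hinv' _ (by have := pvPres_lt s (m + 1); have := pvPres_nonneg s (m + 1); omega)).mp hchk
      refine ⟨i, m, by omega, le_refl m, hml, hval, ?_⟩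
      have b1 := pvPres_nonneg s i; have b2 := pvPres_lt s i
      have b3 := pvPres_nonneg s (m + 1); have b4 := pvPres_lt s (m + 1)
      omega
    · rw [if_neg hchk]
      rw [hrec]
      constructor
      · rintro ⟨i, j, hij, hmj, hj, h1, h2⟩; exact ⟨i, j, hij, by omega, hj, h1, h2⟩
      · rintro ⟨i, j, hij, hmj, hj, h1, h2⟩
        rcases Nat.lt_or_ge j (m + 1) with h | h
        · exfalso
          have hjm : j = m := by omega
          subst hjm
          apply hchk
          apply (hinv' _ (by have := pvPres_lt s (j + 1); have := pvPres_nonneg s (j + 1); omega)).mpr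
          refine ⟨i, by omega, h1, ?_⟩
          rw [h2]
        · exact ⟨i, j, hij, h, hj, h1, h2⟩

theorem getD_fff (r : Nat) : ([false, false, false] : List Bool).getD r false = false := by
  rcases r with _ | _ | _ | r <;> simp [List.getD]

theorem searchB_iff (s : List Char) :
    pvScanB s 0 0 [false, false, false] = true ↔ pvSpec s := by
  have h0 : pvPres s 0 = 0 := by unfold pvPres; simp
  have h := scanB_invariant s s 0 [false, false, false] (by simp) (by simp)
    (by intro r hr; rw [getD_fff]; simp)
  rw [h0] at h
  rw [h]
  unfold pvSpec
  constructor
  · rintro ⟨i, j, hij, _, hj, h1, h2⟩; exact ⟨i, j, hij, hj, h1, h2⟩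
  · rintro ⟨i, j, hij, hj, h1, h2⟩; exact ⟨i, j, hij, Nat.zero_le j, hj, h1, h2⟩

theorem lucky_eq (num : Int) (h : 0 ≤ num) : pvIsLuckyA num = pvIsLuckyB num := by
  unfold pvIsLuckyA pvIsLuckyB
  rw [abs_of_nonneg h]
  by_cases hm : (PySem.Int.mod num 3 == 0) = true
  · rw [if_pos hm, if_pos hm]
  · rw [if_neg hm, if_neg hm]
    rw [Bool.eq_iff_iff, searchA_iff, searchB_iff]

-- ===== VERDICT (by name: the statement is the Claim_ definition above) =====
theorem count_lucky_in_range_spec : Claim_equal_count_lucky_in_range := by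
  intro start end_ _ hpre
  unfold Spec_count_lucky_in_range count_lucky_in_range count_lucky_in_range_alt
  rcases hpre with h | h | ⟨h1, h2⟩
  · rw [PySem.List.pyRange_one_eq_nil (by omega)]; rfl
  · apply PySem.List.foldl_congr_mem
    intro acc x hx
    rw [PySem.List.mem_pyRange_one] at hx
    rw [lucky_eq x (by omega)]
  · by_cases h0 : 0 ≤ start
    · apply PySem.List.foldl_congr_mem
      intro acc x hx
      rw [PySem.List.mem_pyRange_one] at hx
      rw [lucky_eq x (by omega)]
    · subst h1
      rw [PySem.List.pyRange_one_singleton]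
      have hm : (PySem.Int.mod start 3 == 0) = true := by
        rw [PySem.Int.mod_eq_emod_of_pos (by norm_num)]; simp [h2]
      have hA : pvIsLuckyA start = true := by unfold pvIsLuckyA; rw [if_pos hm]
      have hB : pvIsLuckyB start = true := by unfold pvIsLuckyB; rw [if_pos hm]
      simp [List.foldl, hA, hB]
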